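-- pv_equiv track=rewrite | github.com/rhkrdudrb/py | 202303011.py | twoletter
-- ===== SOURCE A (Python) =====
-- def twoletter(letter, index):
--     answer =''
--     num = 0
--     while len(answer) != index:
--         cnt = 0
--         for i in range(index):
--             if ord(letter) +i + 1 > 122 :
--                 answer += chr(ord('a')+ num)
--                 num += 1
--             else:
--                 answer += chr(ord(letter) +i +1)
--     return answer
-- ===== SOURCE B (Python) =====
-- def twoletter(letter, index):
--     base = ord(letter)
--     split = min(max(122 - base, 0), index)
--     seg1 = ''.join(chr(base + i + 1) for i in range(split))
--     seg2 = ''.join(chr(ord('a') + j) for j in range(index - split))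
--     return seg1 + seg2
-- ===== Notes on version B (the rewrite author's own statement) =====
-- stated objective: simpler
-- what changed: A's stateful while/for loop with a branch and an overflow counter is replaced by computing the pivot split = min(max(122-ord(letter),0), index) in closed form and concatenating two directly generated segments (ascending letters, then the alphabet from 'a'); the while wrapper and the counter disappear; Pre_ additionally excludes indices whose overflow segment reaches the lone-surrogate code points (index - max(122-ord(letter),0) > 55199), where A and B return the same ~55200+ character Python str but that str is not a value of Lean's String type, so no port can return it.
-- outside the precondition, e.g. on twoletter('', 0): A returns '', B raises TypeError; on twoletter('a', -1): A does not finish within the time limit, B returns ''; on twoletter('ab', 3): A raises TypeError, B raises TypeError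
import Mathlib
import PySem

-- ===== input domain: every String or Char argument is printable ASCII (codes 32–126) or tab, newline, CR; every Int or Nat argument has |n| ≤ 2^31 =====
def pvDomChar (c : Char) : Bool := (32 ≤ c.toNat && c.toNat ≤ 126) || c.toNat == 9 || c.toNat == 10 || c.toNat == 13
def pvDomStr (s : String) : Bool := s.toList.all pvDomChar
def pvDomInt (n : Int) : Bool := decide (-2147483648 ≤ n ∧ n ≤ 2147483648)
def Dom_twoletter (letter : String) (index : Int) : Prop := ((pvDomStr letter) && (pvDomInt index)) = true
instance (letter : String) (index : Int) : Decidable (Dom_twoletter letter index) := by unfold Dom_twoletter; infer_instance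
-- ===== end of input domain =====

-- B replaces A's stateful while/for counter loop with a closed-form pivot split and two mapped segments (objective: simpler).

-- ===== PORT A =====
-- ord(letter) for a one-character string; Python's ord raises TypeError otherwise (excluded by Pre_).
def pvOrd (letter : String) : Int :=
  match letter.toList with
  | [c] => (c.toNat : Int)
  | _ => 0

-- inner `for i in range(index)` pass of A, state = (answer, num)
def twoletterPass (base index : Int) (st0 : List Char × Int) : List Char × Int :=
  (PySem.List.pyRange 0 index 1).foldl
    (fun st i =>
      if 122 < base + i + 1 then (st.1 ++ [Char.ofNat (97 + st.2).toNat], st.2 + 1)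
      else (st.1 ++ [Char.ofNat (base + i + 1).toNat], st.2))
    st0

-- A's `while len(answer) != index` loop; fuel is a totality guard only: under
-- Pre_ (0 ≤ index) each pass appends exactly `index` characters, so the body runs at most once
-- (on index < 0 Python A never terminates; Pre_ excludes that).
def twoletterWhile (fuel : Nat) (base index : Int) (answer : List Char) (num : Int) : List Char :=
  match fuel with
  | 0 => answer
  | fuel + 1 =>
    if (answer.length : Int) = index then answer
    else
      let st := twoletterPass base index (answer, num)
      twoletterWhile fuel base index st.1 st.2

def twoletter (letter : String) (index : Int) : String :=
  String.ofList (twoletterWhile 2 (pvOrd letter) index [] 0)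

-- ===== PORT B =====
def twoletter_alt (letter : String) (index : Int) : String :=
  let base := pvOrd letter
  let split := min (max (122 - base) 0) index
  String.ofList
    (((PySem.List.pyRange 0 split 1).map fun i => Char.ofNat (base + i + 1).toNat)
      ++ ((PySem.List.pyRange 0 (index - split) 1).map fun j => Char.ofNat (97 + j).toNat))

-- ===== PRECONDITION & SPEC =====
-- Pre_ excludes only inputs on which A raises, diverges, or returns a value outside the ported
-- type: letters that are not exactly one character (Python's ord raises TypeError; at index = 0
-- A returns '' without calling ord, but B's unconditional ord itself raises there); negative
-- index (A's while loop never terminates); and inputs whose overflow segment reaches code point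
-- 0xD800, i.e. index - max(122 - ord(letter), 0) > 55199, where A's returned Python str contains
-- lone UTF-16 surrogate characters that are not values of Lean's Char/String type, so the string
-- A returns is not representable here (B returns the identical Python string on those inputs).
def Pre_twoletter (letter : String) (index : Int) : Prop :=
  letter.toList.length = 1 ∧ 0 ≤ index ∧ index - max (122 - pvOrd letter) 0 ≤ 55199
instance (letter : String) (index : Int) : Decidable (Pre_twoletter letter index) := by
  unfold Pre_twoletter; infer_instance

def pvWitness_twoletter : String × Int := ("b", 3)

def Spec_twoletter (letter : String) (index : Int) (out : String) : Prop := out = twoletter_alt letter index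
instance (letter : String) (index : Int) (out : String) : Decidable (Spec_twoletter letter index out) := by unfold Spec_twoletter; infer_instance

-- ===== CLAIM (what is proved, stated in full; the proofs are below) =====
def Claim_equal_twoletter : Prop := ∀ (letter : String) (index : Int), Dom_twoletter letter index → Pre_twoletter letter index → Spec_twoletter letter index (twoletter letter index)

-- ===== LEMMAS AND PROOFS =====

-- characterization of one inner pass of A, starting from the empty accumulator:
-- the first min n s positions ascend from the letter, the rest walk the alphabet from 'a'.
lemma twoletterPass_eq (base : Int) (s n : Nat)
    (h : ∀ i : Nat, i < n → (122 < base + (i : Int) + 1 ↔ s ≤ i)) :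
    twoletterPass base (n : Int) ([], 0) =
      (((List.range (min n s)).map fun (i : Nat) => Char.ofNat (base + (i : Int) + 1).toNat)
        ++ ((List.range (n - s)).map fun (j : Nat) => Char.ofNat (97 + (j : Int)).toNat),
       ((n - s : Nat) : Int)) := by
  induction n with
  | zero => simp [twoletterPass, PySem.List.pyRange_one_eq_nil]
  | succ n ih =>
    have hstep : PySem.List.pyRange 0 ((n : Int) + 1) 1 = PySem.List.pyRange 0 (n : Int) 1 ++ [(n : Int)] := by
      exact PySem.List.pyRange_one_succ_right (by positivity)
    have ih' := ih (fun i hi => h i (Nat.lt_succ_of_lt hi))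
    have hn := h n (Nat.lt_succ_self n)
    unfold twoletterPass at ih' ⊢
    push_cast
    rw [hstep, List.foldl_append, ih']
    by_cases hs : s ≤ n
    · have hcond : 122 < base + (n : Int) + 1 := hn.mpr hs
      simp only [List.foldl_cons, List.foldl_nil, if_pos hcond]
      have h1 : min (n + 1) s = min n s := by omega
      have h2 : n + 1 - s = (n - s) + 1 := by omega
      rw [h1, h2, List.range_succ]
      refine Prod.ext ?_ ?_
      · simp [List.map_append, List.append_assoc]
      · push_cast; ring
    · have hcond : ¬ 122 < base + (n : Int) + 1 := fun hc => hs (hn.mp hc)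
      simp only [List.foldl_cons, List.foldl_nil, if_neg hcond]
      have h1 : min (n + 1) s = n + 1 := by omega
      have h2 : min n s = n := by omega
      have h3 : n + 1 - s = 0 := by omega
      have h4 : n - s = 0 := by omega
      rw [h1, h2, h3, h4, List.range_succ]
      simp

-- A's two-check while loop equals B's two mapped segments, for any base and n ≥ 0.
lemma twoletter_main (base : Int) (n : Nat) :
    twoletterWhile 2 base (n : Int) [] 0 =
      ((PySem.List.pyRange 0 (min (max (122 - base) 0) (n : Int)) 1).map fun i => Char.ofNat (base + i + 1).toNat)
        ++ ((PySem.List.pyRange 0 ((n : Int) - min (max (122 - base) 0) (n : Int)) 1).map fun j => Char.ofNat (97 + j).toNat) := by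
  obtain ⟨s, hs⟩ : ∃ s : Nat, min (max (122 - base) 0) (n : Int) = (s : Int) :=
    ⟨(min (max (122 - base) 0) (n : Int)).toNat, by omega⟩
  have hsn : s ≤ n := by omega
  have hcond : ∀ i : Nat, i < n → (122 < base + (i : Int) + 1 ↔ s ≤ i) := by
    intro i hi
    have hin : (i : Int) < (n : Int) := by exact_mod_cast hi
    constructor
    · intro hlt
      have : (s : Int) ≤ (i : Int) := by omega
      exact_mod_cast this
    · intro hle
      have : (s : Int) ≤ (i : Int) := by exact_mod_cast hle
      omega
  have hpass := twoletterPass_eq base s n hcond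
  rw [hs, show (n : Int) - (s : Int) = ((n - s : Nat) : Int) by omega,
      PySem.List.pyRange_one, PySem.List.pyRange_one]
  simp only [Int.sub_zero, Int.toNat_natCast, List.map_map]
  by_cases h0 : n = 0
  · subst h0
    have hs0 : s = 0 := by omega
    subst hs0
    simp [twoletterWhile]
  · have hne : ((([] : List Char).length : Int)) ≠ (n : Int) := by
      simp; omega
    have hlen_pass : ((twoletterPass base (n : Int) ([], 0)).1.length : Int) = (n : Int) := by
      rw [hpass]; simp; omega
    simp only [twoletterWhile, if_neg hne, if_pos hlen_pass]
    rw [hpass]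
    simp [min_eq_right hsn, Function.comp_def]

-- ===== VERDICT (by name: the statement is the Claim_ definition above) =====
theorem twoletter_spec : Claim_equal_twoletter := by
  intro letter index _ hPre
  obtain ⟨hlen, hnn, _⟩ := hPre
  unfold Spec_twoletter twoletter twoletter_alt
  have hidx : index = ((index.toNat : Nat) : Int) := by omega
  rw [hidx]
  dsimp only
  rw [twoletter_main]
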